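-- pv_equiv track=rewrite | github.com/lingluodlut/BioCreativeVII_DrugProt | src/DrugProt_Tagging_PD.py | get_one_entity
-- ===== SOURCE A (Python) =====
-- REL_ENT={'arg1':'GENE',
--          'arg2':'CHEMICAL'}
--
-- def get_one_entity(nest_list,cur_ele):
--     max_len=0
--     max_entity=[]
--     for i in range(0, len(nest_list)):
--         if nest_list[i][1]==cur_ele:#current relation entity
--             max_entity=nest_list[i]
--             break
--         length=int(nest_list[i][4])-int(nest_list[i][3])
--         if max_entity==[]: #first entity
--             max_len=length
--             max_entity=nest_list[i]
--         else:
--             if length>max_len: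
--                 if max_entity[2]==REL_ENT['arg1']:
--                     max_len=length
--                     max_entity=nest_list[i]
--                 else:
--                     if nest_list[i][2]==REL_ENT['arg2']:
--                         max_len=length
--                         max_entity=nest_list[i]
--             else:
--                 if max_entity[2]==REL_ENT['arg1'] and nest_list[i][2]==REL_ENT['arg2']:
--                     max_len=length
--                     max_entity=nest_list[i]
--
--     return max_entity
-- ===== SOURCE B (Python) =====
-- REL_ENT={'arg1':'GENE',
--          'arg2':'CHEMICAL'}
--
-- def _span(e):
--     return int(e[4])-int(e[3])
--
-- def get_one_entity(nest_list, cur_ele):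
--     # pass 1: return the first entity whose mention field matches the current relation entity
--     for e in nest_list:
--         if e[1] == cur_ele:
--             return e
--     if not nest_list:
--         return []
--     best, rest = nest_list[0], nest_list[1:]
--     # phase 1: while the incumbent is a GENE, any CHEMICAL or any strictly longer entity takes over
--     while rest and best[2] == REL_ENT['arg1']:
--         e, rest = rest[0], rest[1:]
--         if e[2] == REL_ENT['arg2'] or _span(e) > _span(best):
--             best = e
--     # phase 2: the incumbent is no longer a GENE; only a strictly longer CHEMICAL takes over
--     for e in rest:
--         if e[2] == REL_ENT['arg2'] and _span(e) > _span(best):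
--             best = e
--     return best
-- ===== Notes on version B (the rewrite author's own statement) =====
-- stated objective: alternative
-- what changed: B replaces A's single loop with interleaved match-check and four-way best-update by two sequential passes: a pure search pass returning the first entity matching cur_ele, then a two-phase state machine over the whole list (phase 1: while the incumbent is a GENE, any CHEMICAL or any strictly longer entity takes over; phase 2: only a strictly longer CHEMICAL takes over), which also drops A's max_len accumulator.
import Mathlib
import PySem

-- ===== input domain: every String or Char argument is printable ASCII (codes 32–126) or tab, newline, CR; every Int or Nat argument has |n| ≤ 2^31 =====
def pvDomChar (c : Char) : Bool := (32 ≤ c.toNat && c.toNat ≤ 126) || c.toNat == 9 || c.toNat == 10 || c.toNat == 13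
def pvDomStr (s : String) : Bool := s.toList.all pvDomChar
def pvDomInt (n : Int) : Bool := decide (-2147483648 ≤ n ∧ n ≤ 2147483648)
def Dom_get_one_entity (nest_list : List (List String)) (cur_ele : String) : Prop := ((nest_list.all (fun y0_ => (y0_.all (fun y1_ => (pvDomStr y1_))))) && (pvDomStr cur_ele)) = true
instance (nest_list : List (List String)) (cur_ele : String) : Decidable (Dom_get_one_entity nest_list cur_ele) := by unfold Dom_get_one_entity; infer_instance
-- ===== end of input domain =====

-- B restructures A's single interleaved loop into two sequential passes (match search, then a
-- two-phase GENE/non-GENE selection state machine without the max_len accumulator); objective: alternative.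


-- ===== PORT A =====
def REL_ENT : PySem.Dict String String :=
  (PySem.Dict.empty.insert "arg1" "GENE").insert "arg2" "CHEMICAL"

-- literal port of A's indexed loop as structural recursion with state (max_len, max_entity);
-- where Python raises (IndexError on short rows, ValueError from int()) the port returns [] — excluded by Pre_.
def get_one_entity_loop (cur_ele : String) : List (List String) → Int → List String → List String
  | [], _, max_entity => max_entity
  | e :: rest, max_len, max_entity =>
    if (PySem.List.pyGet? e 1).getD "" == cur_ele then e
    else
      match PySem.Int.ofStr? ((PySem.List.pyGet? e 4).getD ""),
            PySem.Int.ofStr? ((PySem.List.pyGet? e 3).getD "") with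
      | some n4, some n3 =>
        let length : Int := n4 - n3
        if max_entity == ([] : List String) then
          get_one_entity_loop cur_ele rest length e
        else
          if length > max_len then
            if (PySem.List.pyGet? max_entity 2).getD "" == REL_ENT.getD "arg1" "" then
              get_one_entity_loop cur_ele rest length e
            else
              if (PySem.List.pyGet? e 2).getD "" == REL_ENT.getD "arg2" "" then
                get_one_entity_loop cur_ele rest length e
              else
                get_one_entity_loop cur_ele rest max_len max_entity
          else
            if (PySem.List.pyGet? max_entity 2).getD "" == REL_ENT.getD "arg1" ""
               && (PySem.List.pyGet? e 2).getD "" == REL_ENT.getD "arg2" "" then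
              get_one_entity_loop cur_ele rest length e
            else
              get_one_entity_loop cur_ele rest max_len max_entity
      | _, _ => []  -- Python raises here; outside Pre_

def get_one_entity (nest_list : List (List String)) (cur_ele : String) : List String :=
  get_one_entity_loop cur_ele nest_list 0 []

-- ===== PORT B =====
-- B's helper _span(e) = int(e[4]) - int(e[3]); total here via defaults (Pre_ guarantees they are not used).
def pvSpan (e : List String) : Int :=
  (PySem.Int.ofStr? ((PySem.List.pyGet? e 4).getD "")).getD 0
    - (PySem.Int.ofStr? ((PySem.List.pyGet? e 3).getD "")).getD 0

-- pass 1: first entity whose field 1 matches cur_ele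
def altFind (cur_ele : String) : List (List String) → Option (List String)
  | [] => none
  | e :: rest =>
    if (PySem.List.pyGet? e 1).getD "" == cur_ele then some e else altFind cur_ele rest

-- phase 2: only a strictly longer CHEMICAL takes over
def altPhase2 : List (List String) → List String → List String
  | [], best => best
  | e :: rest, best =>
    if (PySem.List.pyGet? e 2).getD "" == REL_ENT.getD "arg2" ""
       && decide (pvSpan e > pvSpan best) then
      altPhase2 rest e
    else
      altPhase2 rest best

-- phase 1: while the incumbent is a GENE, any CHEMICAL or any strictly longer entity takes over
def altPhase1 : List (List String) → List String → List String
  | [], best => best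
  | e :: rest, best =>
    if (PySem.List.pyGet? best 2).getD "" == REL_ENT.getD "arg1" "" then
      if (PySem.List.pyGet? e 2).getD "" == REL_ENT.getD "arg2" ""
         || decide (pvSpan e > pvSpan best) then
        altPhase1 rest e
      else
        altPhase1 rest best
    else
      altPhase2 (e :: rest) best

def get_one_entity_alt (nest_list : List (List String)) (cur_ele : String) : List String :=
  match altFind cur_ele nest_list with
  | some e => e
  | none =>
    match nest_list with
    | [] => []
    | f :: rest => altPhase1 rest f

-- ===== PRECONDITION & SPEC =====
-- Pre_ excludes exactly the inputs where A raises: every row up to and including the first one whose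
-- second field equals cur_ele must have at least 2 fields, and every row strictly before that match
-- (all rows, if no match) must have at least 5 fields with int()-parseable fields 3 and 4.
def pvRowOK (e : List String) : Bool :=
  decide (5 ≤ e.length)
    && (PySem.Int.ofStr? ((PySem.List.pyGet? e 4).getD "")).isSome
    && (PySem.Int.ofStr? ((PySem.List.pyGet? e 3).getD "")).isSome

-- closed form: with k the position of the first row whose field 1 equals cur_ele (k = length if
-- none), every row up to and including position k has ≥ 2 fields, and every row strictly before
-- position k is rowOK.
def Pre_get_one_entity (nest_list : List (List String)) (cur_ele : String) : Prop :=
  (∀ e ∈ nest_list.take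
      (nest_list.findIdx (fun e => (PySem.List.pyGet? e 1).getD "" == cur_ele) + 1),
    2 ≤ e.length) ∧
  (∀ e ∈ nest_list.take
      (nest_list.findIdx (fun e => (PySem.List.pyGet? e 1).getD "" == cur_ele)),
    pvRowOK e = true)
instance (nest_list : List (List String)) (cur_ele : String) : Decidable (Pre_get_one_entity nest_list cur_ele) := by unfold Pre_get_one_entity; infer_instance

def pvWitness_get_one_entity : List (List String) × String :=
  ([["T1", "x1", "GENE", "0", "3"], ["T2", "x2", "CHEMICAL", "1", "9"]], "x9")

def Spec_get_one_entity (nest_list : List (List String)) (cur_ele : String) (out : List String) : Prop := out = get_one_entity_alt nest_list cur_ele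
instance (nest_list : List (List String)) (cur_ele : String) (out : List String) : Decidable (Spec_get_one_entity nest_list cur_ele out) := by unfold Spec_get_one_entity; infer_instance

-- ===== CLAIM (what is proved, stated in full; the proofs are below) =====
def Claim_equal_get_one_entity : Prop := ∀ (nest_list : List (List String)) (cur_ele : String), Dom_get_one_entity nest_list cur_ele → Pre_get_one_entity nest_list cur_ele → Spec_get_one_entity nest_list cur_ele (get_one_entity nest_list cur_ele)

-- ===== LEMMAS AND PROOFS =====

-- recursive characterization of Pre_ used by the loop lemmas
def pvPreList (cur_ele : String) : List (List String) → Bool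
  | [] => true
  | e :: rest =>
    decide (2 ≤ e.length)
      && ((PySem.List.pyGet? e 1).getD "" == cur_ele || (pvRowOK e && pvPreList cur_ele rest))

theorem pre_imp_preList (nest_list : List (List String)) (cur_ele : String)
    (h : Pre_get_one_entity nest_list cur_ele) : pvPreList cur_ele nest_list = true := by
  induction nest_list with
  | nil => rfl
  | cons e rest ih =>
    obtain ⟨h1, h2⟩ := h
    rw [List.findIdx_cons] at h1 h2
    by_cases hm : ((PySem.List.pyGet? e 1).getD "" == cur_ele) = true
    · simp only [hm, cond_true] at h1
      have hlen : 2 ≤ e.length := h1 e (by simp)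
      simp [pvPreList, hm, hlen]
    · have hmf : ((PySem.List.pyGet? e 1).getD "" == cur_ele) = false := Bool.eq_false_iff.mpr hm
      simp only [hmf, cond_false] at h1 h2
      have hlen : 2 ≤ e.length := h1 e (by simp)
      have hrow : pvRowOK e = true := h2 e (by simp)
      have hrest : pvPreList cur_ele rest = true := by
        apply ih
        constructor
        · intro x hx; exact h1 x (by simp [hx])
        · intro x hx; exact h2 x (by simp [hx])
      simp [pvPreList, hlen, hmf, hrow, hrest]

-- When the incumbent best is not a GENE, A's loop (with max_len = span best) computes B's
-- "match, else phase 2" behaviour.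
theorem loop_eq_phase2 (cur_ele : String) :
    ∀ (l : List (List String)) (best : List String),
      pvPreList cur_ele l = true → best ≠ [] →
      ((PySem.List.pyGet? best 2).getD "" == REL_ENT.getD "arg1" "") = false →
      get_one_entity_loop cur_ele l (pvSpan best) best
        = (match altFind cur_ele l with
           | some e => e
           | none => altPhase2 l best) := by
  intro l
  induction l with
  | nil => intro best _ _ _; rfl
  | cons e rest ih =>
    intro best hpre hne hbG
    rw [pvPreList] at hpre
    simp only [Bool.and_eq_true, decide_eq_true_eq] at hpre
    obtain ⟨hlen, hmatch⟩ := hpre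
    rw [Bool.or_eq_true] at hmatch
    by_cases hm : ((PySem.List.pyGet? e 1).getD "" == cur_ele) = true
    · simp [get_one_entity_loop, altFind, hm]
    · have hok : (pvRowOK e && pvPreList cur_ele rest) = true := by
        rcases hmatch with h | h
        · exact absurd h hm
        · exact h
      simp only [Bool.and_eq_true] at hok
      obtain ⟨hrow, hrest⟩ := hok
      simp only [pvRowOK, Bool.and_eq_true, decide_eq_true_eq] at hrow
      obtain ⟨⟨hlen5, hs4⟩, hs3⟩ := hrow
      obtain ⟨n4, h4⟩ := Option.isSome_iff_exists.mp hs4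
      obtain ⟨n3, h3⟩ := Option.isSome_iff_exists.mp hs3
      have hspan : pvSpan e = n4 - n3 := by simp [pvSpan, h4, h3]
      have hbeq : (best == ([] : List String)) = false := by simpa using hne
      have hene : e ≠ [] := by intro h; subst h; simp at hlen
      simp only [get_one_entity_loop, altFind, altPhase2, hm, Bool.false_eq_true, if_false,
        h4, h3, hbeq]
      by_cases hgt : (n4 - n3 : Int) > pvSpan best
      · by_cases heC : ((PySem.List.pyGet? e 2).getD "" == REL_ENT.getD "arg2" "") = true
        · have heG : ((PySem.List.pyGet? e 2).getD "" == REL_ENT.getD "arg1" "") = false := by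
            have harg2 : REL_ENT.getD "arg2" "" = "CHEMICAL" := by decide
            have harg1 : REL_ENT.getD "arg1" "" = "GENE" := by decide
            have hchem : (PySem.List.pyGet? e 2).getD "" = "CHEMICAL" := by
              rw [harg2] at heC; exact eq_of_beq heC
            rw [hchem, harg1]; decide
          have := ih e hrest hene heG
          rw [hspan] at this
          simp [hgt, hbG, heC, hspan, this]
        · have := ih best hrest hne hbG
          simp [hgt, hbG, heC, hspan, this]
      · have := ih best hrest hne hbG
        simp [hgt, hbG, hspan, this]

-- In general, A's loop (with max_len = span best) computes B's "match, else phase 1" behaviour.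
theorem loop_eq_phase1 (cur_ele : String) :
    ∀ (l : List (List String)) (best : List String),
      pvPreList cur_ele l = true → best ≠ [] →
      get_one_entity_loop cur_ele l (pvSpan best) best
        = (match altFind cur_ele l with
           | some e => e
           | none => altPhase1 l best) := by
  intro l
  induction l with
  | nil => intro best _ _; rfl
  | cons e rest ih =>
    intro best hpre hne
    by_cases hbG : ((PySem.List.pyGet? best 2).getD "" == REL_ENT.getD "arg1" "") = true
    · rw [pvPreList] at hpre
      simp only [Bool.and_eq_true, decide_eq_true_eq] at hpre
      obtain ⟨hlen, hmatch⟩ := hpre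
      rw [Bool.or_eq_true] at hmatch
      by_cases hm : ((PySem.List.pyGet? e 1).getD "" == cur_ele) = true
      · simp [get_one_entity_loop, altFind, hm]
      · have hok : (pvRowOK e && pvPreList cur_ele rest) = true := by
          rcases hmatch with h | h
          · exact absurd h hm
          · exact h
        simp only [Bool.and_eq_true] at hok
        obtain ⟨hrow, hrest⟩ := hok
        simp only [pvRowOK, Bool.and_eq_true, decide_eq_true_eq] at hrow
        obtain ⟨⟨hlen5, hs4⟩, hs3⟩ := hrow
        obtain ⟨n4, h4⟩ := Option.isSome_iff_exists.mp hs4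
        obtain ⟨n3, h3⟩ := Option.isSome_iff_exists.mp hs3
        have hspan : pvSpan e = n4 - n3 := by simp [pvSpan, h4, h3]
        have hbeq : (best == ([] : List String)) = false := by simpa using hne
        have hene : e ≠ [] := by intro h; subst h; simp at hlen
        simp only [get_one_entity_loop, altFind, altPhase1, hm, Bool.false_eq_true, if_false,
          h4, h3, hbeq, hbG, if_true]
        by_cases hgt : (n4 - n3 : Int) > pvSpan best
        · have := ih e hrest hene
          rw [hspan] at this
          simp [hgt, hspan, this]
        · by_cases heC : ((PySem.List.pyGet? e 2).getD "" == REL_ENT.getD "arg2" "") = true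
          · have := ih e hrest hene
            rw [hspan] at this
            simp [hgt, heC, hspan, this]
          · have := ih best hrest hne
            simp [hgt, heC, hspan, this]
    · have hbG' : ((PySem.List.pyGet? best 2).getD "" == REL_ENT.getD "arg1" "") = false :=
        Bool.eq_false_iff.mpr hbG
      have := loop_eq_phase2 cur_ele (e :: rest) best hpre hne hbG'
      rw [this]
      cases hf : altFind cur_ele (e :: rest) with
      | some _ => rfl
      | none => simp [altPhase1, hbG']

-- ===== VERDICT (by name: the statement is the Claim_ definition above) =====
theorem get_one_entity_spec : Claim_equal_get_one_entity := by
  intro nest_list cur_ele _ hpre0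
  have hpre := pre_imp_preList nest_list cur_ele hpre0
  unfold Spec_get_one_entity get_one_entity get_one_entity_alt
  cases nest_list with
  | nil => rfl
  | cons f rest =>
    rw [pvPreList] at hpre
    simp only [Bool.and_eq_true, decide_eq_true_eq] at hpre
    obtain ⟨hlen, hmatch⟩ := hpre
    rw [Bool.or_eq_true] at hmatch
    by_cases hm : ((PySem.List.pyGet? f 1).getD "" == cur_ele) = true
    · simp [get_one_entity_loop, altFind, hm]
    · have hok : (pvRowOK f && pvPreList cur_ele rest) = true := by
        rcases hmatch with h | h
        · exact absurd h hm
        · exact h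
      simp only [Bool.and_eq_true] at hok
      obtain ⟨hrow, hrest⟩ := hok
      simp only [pvRowOK, Bool.and_eq_true, decide_eq_true_eq] at hrow
      obtain ⟨⟨hlen5, hs4⟩, hs3⟩ := hrow
      obtain ⟨n4, h4⟩ := Option.isSome_iff_exists.mp hs4
      obtain ⟨n3, h3⟩ := Option.isSome_iff_exists.mp hs3
      have hfne : f ≠ [] := by intro h; subst h; simp at hlen
      have hspan : pvSpan f = n4 - n3 := by simp [pvSpan, h4, h3]
      simp only [get_one_entity_loop, altFind, hm, Bool.false_eq_true, if_false, h4, h3,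
        BEq.rfl, if_true]
      rw [← hspan, loop_eq_phase1 cur_ele rest f hrest hfne]
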